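-- pv_equiv track=rewrite | github.com/jcolinpatrick/kryptos | scripts/substitution/e_atbash_03_crib_drag.py | analyze_key_periodicity
-- ===== SOURCE A (Python) =====
-- def analyze_key_periodicity(keys: list[int], label: str = "") -> list[str]:
--     """Look for internal periodicity in a key fragment."""
--     findings = []
--     n = len(keys)
--     for period in range(1, n):
--         matches = 0
--         comparisons = 0
--         for i in range(n):
--             for j in range(i + 1, n):
--                 if (j - i) % period == 0:
--                     comparisons += 1
--                     if keys[i] == keys[j]:
--                         matches += 1
--         if comparisons > 0 and matches == comparisons:
--             findings.append(f"period-{period} (all {comparisons} pairs agree)")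
--     return findings
-- ===== SOURCE B (Python) =====
-- def analyze_key_periodicity(keys: list[int], label: str = "") -> list[str]:
--     """Look for internal periodicity in a key fragment."""
--     n = len(keys)
--     findings = []
--     for period in range(1, n):
--         if all(keys[i] == keys[i + period] for i in range(n - period)):
--             comparisons = sum((n - 1 - i) // period for i in range(n))
--             findings.append(f"period-{period} (all {comparisons} pairs agree)")
--     return findings
-- ===== Notes on version B (the rewrite author's own statement) =====
-- stated objective: faster
-- what changed: Per period, A scans all O(n^2) index pairs and filters by divisibility; B checks only the n-period adjacent pairs at offset period (equality propagates along chains) and computes the pair count by a closed-form floor-division sum.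
import Mathlib
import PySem

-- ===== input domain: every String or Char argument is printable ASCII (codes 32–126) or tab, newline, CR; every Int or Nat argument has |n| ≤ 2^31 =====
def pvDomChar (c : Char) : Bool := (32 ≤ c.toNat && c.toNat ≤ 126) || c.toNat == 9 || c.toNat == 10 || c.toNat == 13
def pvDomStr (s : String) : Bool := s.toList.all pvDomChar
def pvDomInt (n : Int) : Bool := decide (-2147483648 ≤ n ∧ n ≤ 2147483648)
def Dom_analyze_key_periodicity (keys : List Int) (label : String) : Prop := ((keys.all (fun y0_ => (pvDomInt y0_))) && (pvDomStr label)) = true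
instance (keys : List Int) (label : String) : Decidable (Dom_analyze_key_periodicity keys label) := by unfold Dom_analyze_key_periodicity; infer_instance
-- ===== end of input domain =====

-- B replaces A's all-pairs scan per period by an adjacent-offset check plus a closed-form
-- pair count per period (objective: faster); return values are identical.

-- ===== PORT A =====
-- state mc = (matches, comparisons), exactly A's two counters
def analyze_key_periodicity (keys : List Int) (label : String) : List String :=
  let n : Int := keys.length
  (PySem.List.pyRange 1 n 1).foldl (fun findings period =>
    let mc : Int × Int :=
      (PySem.List.pyRange 0 n 1).foldl (fun mc i =>
        (PySem.List.pyRange (i+1) n 1).foldl (fun mc j =>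
          if PySem.Int.mod (j - i) period == 0 then
            -- comparisons += 1; if keys[i] == keys[j]: matches += 1
            if PySem.List.pyGet? keys i == PySem.List.pyGet? keys j then
              (mc.1 + 1, mc.2 + 1)
            else
              (mc.1, mc.2 + 1)
          else mc) mc) (0, 0)
    if 0 < mc.2 ∧ mc.1 = mc.2 then
      findings ++ ["period-" ++ PySem.Int.toStr period ++ " (all " ++ PySem.Int.toStr mc.2 ++ " pairs agree)"]
    else findings) []

-- ===== PORT B =====
def analyze_key_periodicity_alt (keys : List Int) (label : String) : List String :=
  let n : Int := keys.length
  (PySem.List.pyRange 1 n 1).foldl (fun findings period =>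
    if (PySem.List.pyRange 0 (n - period) 1).all
        (fun i => PySem.List.pyGet? keys i == PySem.List.pyGet? keys (i + period)) then
      let comparisons : Int :=
        ((PySem.List.pyRange 0 n 1).map (fun i => PySem.Int.floordiv (n - 1 - i) period)).sum
      findings ++ ["period-" ++ PySem.Int.toStr period ++ " (all " ++ PySem.Int.toStr comparisons ++ " pairs agree)"]
    else findings) []

-- ===== PRECONDITION & SPEC =====
def Spec_analyze_key_periodicity (keys : List Int) (label : String) (out : List String) : Prop := out = analyze_key_periodicity_alt keys label
instance (keys : List Int) (label : String) (out : List String) : Decidable (Spec_analyze_key_periodicity keys label out) := by unfold Spec_analyze_key_periodicity; infer_instance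

-- ===== CLAIM (what is proved, stated in full; the proofs are below) =====
def Claim_equal_analyze_key_periodicity : Prop := ∀ (keys : List Int) (label : String), Dom_analyze_key_periodicity keys label → Spec_analyze_key_periodicity keys label (analyze_key_periodicity keys label)

-- ===== LEMMAS AND PROOFS =====

-- A's per-(period,i) counters, named for the proofs
def pvC (keys : List Int) (p i : Int) : Nat :=
  (PySem.List.pyRange (i+1) (keys.length : Int) 1).countP (fun j => PySem.Int.mod (j - i) p == 0)
def pvM (keys : List Int) (p i : Int) : Nat :=
  (PySem.List.pyRange (i+1) (keys.length : Int) 1).countP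
    (fun j => (PySem.Int.mod (j - i) p == 0) && (PySem.List.pyGet? keys i == PySem.List.pyGet? keys j))

-- A's innermost j-loop counts pairs
lemma pv_inner (keys : List Int) (p i : Int) (L : List Int) (m c : Int) :
    L.foldl (fun mc j =>
        if PySem.Int.mod (j - i) p == 0 then
          if PySem.List.pyGet? keys i == PySem.List.pyGet? keys j then
            (mc.1 + 1, mc.2 + 1)
          else (mc.1, mc.2 + 1)
        else mc) (m, c)
      = (m + (L.countP (fun j => (PySem.Int.mod (j - i) p == 0) && (PySem.List.pyGet? keys i == PySem.List.pyGet? keys j)) : Int),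
         c + (L.countP (fun j => PySem.Int.mod (j - i) p == 0) : Int)) := by
  induction L generalizing m c with
  | nil => simp
  | cons hd tl ih =>
    by_cases h1 : (PySem.Int.mod (hd - i) p == 0) = true <;>
      by_cases h2 : (PySem.List.pyGet? keys i == PySem.List.pyGet? keys hd) = true <;>
      simp only [List.foldl_cons, List.countP_cons, h1, h2, Bool.not_eq_true] at * <;>
      simp only [h1, h2, if_true, if_false, Bool.and_true, Bool.and_false,
        Bool.false_eq_true] <;>
      rw [ih] <;> simp only [Prod.mk.injEq] <;> constructor <;> push_cast <;> ring

-- the i-loop sums the per-i counters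
lemma pv_outer (f g : Int → Nat) (L : List Int) (m c : Int) :
    L.foldl (fun (mc : Int × Int) i => (mc.1 + (f i : Int), mc.2 + (g i : Int))) (m, c)
      = (m + (L.map (fun i => (f i : Int))).sum, c + (L.map (fun i => (g i : Int))).sum) := by
  induction L generalizing m c with
  | nil => simp
  | cons hd tl ih =>
    simp only [List.foldl_cons, List.map_cons, List.sum_cons, ih, Prod.mk.injEq]
    constructor <;> ring

-- counting multiples of p in (i, i+1+k)
lemma pv_count_mult (p : Int) (hp : 0 < p) (i : Int) (k : Nat) :
    (PySem.List.pyRange (i+1) (i+1+(k : Int)) 1).countP (fun j => PySem.Int.mod (j - i) p == 0)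
      = k / p.toNat := by
  induction k with
  | zero => simp [PySem.List.pyRange_one_eq_nil]
  | succ k ih =>
    have h1 : (i+1 : Int) ≤ i+1+(k:Int) := by omega
    have h2 : (i+1+((k+1 : Nat) : Int)) = (i+1+(k:Int)) + 1 := by push_cast; ring
    rw [h2, PySem.List.pyRange_one_succ_right h1, List.countP_append, ih]
    have hdec : (PySem.Int.mod ((i+1+(k:Int)) - i) p == 0) = decide (p ∣ ((k:Int)+1)) := by
      have h3 : (i+1+(k:Int)) - i = (k:Int)+1 := by ring
      rw [h3]
      by_cases h : p ∣ ((k:Int)+1)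
      · simp [h, (PySem.Int.mod_eq_zero_iff_dvd _ _).2 h]
      · simp only [h, decide_false]
        simp [PySem.Int.mod_eq_zero_iff_dvd, h]
    have hiff : p ∣ ((k:Int)+1) ↔ p.toNat ∣ (k+1) := by
      have hp' : p = (p.toNat : Int) := by omega
      rw [hp']
      exact_mod_cast Int.natCast_dvd_natCast.symm
    rw [Nat.succ_div]
    by_cases h : p.toNat ∣ (k+1)
    · simp only [List.countP_singleton, hdec]
      simp [hiff, h]
    · simp only [List.countP_singleton, hdec]
      simp [hiff, h]

-- closed form of A's comparison count
lemma pvC_eq (keys : List Int) (p i : Int) (hp : 0 < p) (hi : i < (keys.length : Int)) :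
    ((pvC keys p i : Nat) : Int) = PySem.Int.floordiv ((keys.length : Int) - 1 - i) p := by
  unfold pvC
  set k : Nat := ((keys.length : Int) - 1 - i).toNat with hk
  have hn : (keys.length : Int) = i + 1 + (k : Int) := by omega
  rw [hn, pv_count_mult p hp i k]
  have h1 : (i + 1 + (k:Int)) - 1 - i = (k : Int) := by ring
  rw [h1]
  have hp' : p = (p.toNat : Int) := by omega
  rw [hp', PySem.Int.floordiv_natCast]
  norm_num

-- sums of pointwise-dominated Nat maps are equal iff they agree pointwise
lemma pv_sum_map_eq_iff (f g : Int → Nat) (L : List Int) (h : ∀ x ∈ L, f x ≤ g x) :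
    (L.map f).sum = (L.map g).sum ↔ ∀ x ∈ L, f x = g x := by
  induction L with
  | nil => simp
  | cons hd tl ih =>
    have h1 : f hd ≤ g hd := h hd (by simp)
    have h2 : (tl.map f).sum ≤ (tl.map g).sum := by
      apply List.sum_le_sum
      intro y hy
      exact h y (List.mem_cons_of_mem _ hy)
    simp only [List.map_cons, List.sum_cons]
    constructor
    · intro he
      have h3 : f hd = g hd ∧ (tl.map f).sum = (tl.map g).sum := by omega
      intro x hx
      rcases List.mem_cons.1 hx with rfl | hx
      · exact h3.1
      · exact (ih (fun x hx => h x (List.mem_cons_of_mem _ hx))).1 h3.2 x hx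
    · intro hall
      have h5 : f hd = g hd := hall hd (by simp)
      have h4 : (tl.map f).sum = (tl.map g).sum :=
        (ih (fun x hx => h x (List.mem_cons_of_mem _ hx))).2 (fun x hx => hall x (List.mem_cons_of_mem _ hx))
      omega

lemma pvM_le_pvC (keys : List Int) (p i : Int) : pvM keys p i ≤ pvC keys p i := by
  apply List.countP_mono_left
  intro a _ ha
  simp only [Bool.and_eq_true] at ha
  exact ha.1

-- per-i: all compared pairs agree iff every multiple-offset partner matches
lemma pvM_eq_pvC_iff (keys : List Int) (p i : Int) :
    pvM keys p i = pvC keys p i ↔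
      ∀ j ∈ PySem.List.pyRange (i+1) (keys.length : Int) 1,
        PySem.Int.mod (j - i) p = 0 → PySem.List.pyGet? keys i = PySem.List.pyGet? keys j := by
  unfold pvM pvC
  set L := PySem.List.pyRange (i+1) (keys.length : Int) 1 with hL
  have h1 : L.countP (fun j => (PySem.Int.mod (j - i) p == 0) && (PySem.List.pyGet? keys i == PySem.List.pyGet? keys j))
      = (L.filter (fun j => PySem.Int.mod (j - i) p == 0)).countP (fun j => PySem.List.pyGet? keys i == PySem.List.pyGet? keys j) := by
    rw [List.countP_filter]
    apply List.countP_congr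
    intro j _
    rw [Bool.and_comm]
  have h2 : L.countP (fun j => PySem.Int.mod (j - i) p == 0)
      = (L.filter (fun j => PySem.Int.mod (j - i) p == 0)).length :=
    List.countP_eq_length_filter
  rw [h1, h2, List.countP_eq_length]
  constructor
  · intro hall j hj hmod
    have := hall j (List.mem_filter.2 ⟨hj, by simp [hmod]⟩)
    simpa using this
  · intro hall j hj
    rw [List.mem_filter] at hj
    simp only [beq_iff_eq] at hj ⊢
    exact hall j hj.1 (by simpa using hj.2)

-- chain lemma: adjacent agreement at offset p propagates to every multiple of p
lemma pv_chain (keys : List Int) (p : Int) (hp : 0 < p)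
    (hadj : ∀ i, 0 ≤ i → i + p < (keys.length : Int) →
      PySem.List.pyGet? keys i = PySem.List.pyGet? keys (i + p)) :
    ∀ d : Nat, ∀ i j : Int, 0 ≤ i → j < (keys.length : Int) → i < j → (j - i).toNat = d →
      p ∣ (j - i) → PySem.List.pyGet? keys i = PySem.List.pyGet? keys j := by
  intro d
  induction d using Nat.strong_induction_on with
  | _ d ih =>
    intro i j h0 hj hij hd hdvd
    have hple : p ≤ j - i := Int.le_of_dvd (by omega) hdvd
    by_cases hcase : j - i = p
    · have h4 : j = i + p := by omega
      subst h4
      exact hadj i h0 (by omega)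
    · have hdvd2 : p ∣ (j - (i + p)) := by
        have h5 : j - (i + p) = (j - i) - p := by ring
        rw [h5]
        exact dvd_sub hdvd dvd_rfl
      have h2p : p ≤ j - (i + p) := Int.le_of_dvd (by omega) hdvd2
      have step : PySem.List.pyGet? keys i = PySem.List.pyGet? keys (i + p) :=
        hadj i h0 (by omega)
      have rest : PySem.List.pyGet? keys (i + p) = PySem.List.pyGet? keys j :=
        ih (j - (i + p)).toNat (by omega) (i + p) j (by omega) hj (by omega) rfl hdvd2
      exact step.trans rest

-- casting a summed Nat map into Int
lemma pv_cast_sum (f : Int → Nat) (L : List Int) :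
    (L.map (fun i => ((f i : Nat) : Int))).sum = (((L.map f).sum : Nat) : Int) := by
  rw [Nat.cast_list_sum, List.map_map]
  rfl

-- A's success test equals B's adjacent-offset test
lemma pv_cond_iff (keys : List Int) (p : Int) (hp : 0 < p) (hpn : p < (keys.length : Int)) :
    (((PySem.List.pyRange 0 ((keys.length : Int)) 1).map (fun i => (pvM keys p i : Int))).sum
      = ((PySem.List.pyRange 0 ((keys.length : Int)) 1).map (fun i => (pvC keys p i : Int))).sum ↔
    (PySem.List.pyRange 0 ((keys.length : Int) - p) 1).all
      (fun i => PySem.List.pyGet? keys i == PySem.List.pyGet? keys (i + p)) = true) := by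
  rw [pv_cast_sum, pv_cast_sum, Nat.cast_inj,
    pv_sum_map_eq_iff _ _ _ (fun x _ => pvM_le_pvC keys p x), List.all_eq_true]
  constructor
  · intro hall i hi
    rw [PySem.List.mem_pyRange_one] at hi
    have hm := (pvM_eq_pvC_iff keys p i).1
      (hall i (by rw [PySem.List.mem_pyRange_one]; omega))
    have hj : (i + p) ∈ PySem.List.pyRange (i+1) (keys.length : Int) 1 := by
      rw [PySem.List.mem_pyRange_one]; omega
    have hmod : PySem.Int.mod ((i + p) - i) p = 0 := by
      rw [PySem.Int.mod_eq_zero_iff_dvd]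
      exact ⟨1, by ring⟩
    simpa using hm (i + p) hj hmod
  · intro hadj i hi
    rw [PySem.List.mem_pyRange_one] at hi
    rw [pvM_eq_pvC_iff]
    intro j hj hmod
    rw [PySem.List.mem_pyRange_one] at hj
    have hadj' : ∀ a : Int, 0 ≤ a → a + p < (keys.length : Int) →
        PySem.List.pyGet? keys a = PySem.List.pyGet? keys (a + p) := by
      intro a ha hap
      have := hadj a (by rw [PySem.List.mem_pyRange_one]; omega)
      simpa using this
    exact pv_chain keys p hp hadj' (j - i).toNat i j (by omega) (by omega) (by omega) rfl
      ((PySem.Int.mod_eq_zero_iff_dvd _ _).1 hmod)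

-- A's total comparison count is positive for every admitted period
lemma pv_comp_pos (keys : List Int) (p : Int) (hp : 0 < p) (hpn : p < (keys.length : Int)) :
    0 < ((PySem.List.pyRange 0 ((keys.length : Int)) 1).map (fun i => (pvC keys p i : Int))).sum := by
  rw [PySem.List.pyRange_one_cons (by omega : (0:Int) < (keys.length : Int))]
  rw [List.map_cons, List.sum_cons]
  have h1 : (1 : Int) ≤ (pvC keys p 0 : Int) := by
    rw [pvC_eq keys p 0 hp (by omega)]
    rw [PySem.Int.le_floordiv_iff_mul_le hp]
    omega
  have h2 : (0:Int) ≤ ((PySem.List.pyRange (0+1) ((keys.length : Int)) 1).map (fun i => (pvC keys p i : Int))).sum := by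
    apply List.sum_nonneg
    intro x hx
    simp only [List.mem_map] at hx
    obtain ⟨y, _, rfl⟩ := hx
    positivity
  omega

-- ===== VERDICT (by name: the statement is the Claim_ definition above) =====
theorem analyze_key_periodicity_spec : Claim_equal_analyze_key_periodicity := by
  intro keys label _
  unfold Spec_analyze_key_periodicity analyze_key_periodicity analyze_key_periodicity_alt
  apply PySem.List.foldl_congr_mem
  intro acc p hp
  rw [PySem.List.mem_pyRange_one] at hp
  -- rewrite A's double loop into the counter sums
  have houter :
      (PySem.List.pyRange 0 ((keys.length : Int)) 1).foldl (fun mc i =>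
        (PySem.List.pyRange (i+1) (keys.length : Int) 1).foldl (fun mc j =>
          if PySem.Int.mod (j - i) p == 0 then
            if PySem.List.pyGet? keys i == PySem.List.pyGet? keys j then
              (mc.1 + 1, mc.2 + 1)
            else (mc.1, mc.2 + 1)
          else mc) mc) ((0,0) : Int × Int)
      = (((PySem.List.pyRange 0 ((keys.length : Int)) 1).map (fun i => (pvM keys p i : Int))).sum,
         ((PySem.List.pyRange 0 ((keys.length : Int)) 1).map (fun i => (pvC keys p i : Int))).sum) := by
    rw [PySem.List.foldl_congr_mem (g := fun (mc : Int × Int) i =>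
      (mc.1 + (pvM keys p i : Int), mc.2 + (pvC keys p i : Int)))]
    · rw [pv_outer]
      simp
    · intro mc i _
      have h6 := pv_inner keys p i (PySem.List.pyRange (i+1) (keys.length : Int) 1) mc.1 mc.2
      rw [pvM, pvC]
      exact h6
  rw [houter]
  by_cases hcond :
      ((PySem.List.pyRange 0 ((keys.length : Int)) 1).map (fun i => (pvM keys p i : Int))).sum
        = ((PySem.List.pyRange 0 ((keys.length : Int)) 1).map (fun i => (pvC keys p i : Int))).sum
  · have hall := (pv_cond_iff keys p (by omega) hp.2).1 hcond
    rw [if_pos ⟨pv_comp_pos keys p (by omega) hp.2, hcond⟩, if_pos hall]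
    have hsum :
        ((PySem.List.pyRange 0 ((keys.length : Int)) 1).map (fun i => (pvC keys p i : Int))).sum
          = ((PySem.List.pyRange 0 ((keys.length : Int)) 1).map
              (fun i => PySem.Int.floordiv ((keys.length : Int) - 1 - i) p)).sum := by
      apply congrArg
      apply List.map_congr_left
      intro i hi
      rw [PySem.List.mem_pyRange_one] at hi
      exact pvC_eq keys p i (by omega) hi.2
    rw [hsum]
  · have hall : ¬ ((PySem.List.pyRange 0 ((keys.length : Int) - p) 1).all
        (fun i => PySem.List.pyGet? keys i == PySem.List.pyGet? keys (i + p)) = true) := by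
      intro hx
      exact hcond ((pv_cond_iff keys p (by omega) hp.2).2 hx)
    rw [if_neg (fun hc => hcond hc.2), if_neg hall]
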